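-- pv_equiv track=rewrite | github.com/sqoshi/hands-to-text | package/hands_to_text/text/strategy.py | process
-- ===== SOURCE A (Python) =====
-- def process(text: str, min_reps: int = 10) -> str:
--     filtered_string = ""
--     current_symbol = None
--     current_count = 0
--
--     for i, symbol in enumerate(text):
--         if symbol == current_symbol:
--             current_count += 1
--         else:
--             if current_symbol and current_count < min_reps:
--                 filtered_string += current_symbol * current_count
--             current_symbol = symbol
--             current_count = 1
--
--     if current_symbol and current_count < min_reps:
--         filtered_string += current_symbol * current_count
--
--     return filtered_string
-- ===== SOURCE B (Python) =====
-- def process(text: str, min_reps: int = 10) -> str: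
--     # Pass 1 (backward): tail[i] = length of the equal-char run starting at i.
--     n = len(text)
--     tail = [1] * n
--     for i in range(n - 2, -1, -1):
--         if text[i] == text[i + 1]:
--             tail[i] = tail[i + 1] + 1
--     # Pass 2 (forward): keep each character iff its whole run is shorter than min_reps.
--     out = []
--     full = 0
--     for i, c in enumerate(text):
--         if i == 0 or c != text[i - 1]:
--             full = tail[i]
--         if full < min_reps:
--             out.append(c)
--     return "".join(out)
-- ===== Notes on version B (the rewrite author's own statement) =====
-- stated objective: alternative
-- what changed: Replaces A's single-pass run-emitting state machine (current_symbol/current_count with a post-loop flush) by a two-stage per-character filter: a backward pass computes each position's run length into an array, then a forward pass keeps each character iff the length of the run containing it is below min_reps.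
import Mathlib
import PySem

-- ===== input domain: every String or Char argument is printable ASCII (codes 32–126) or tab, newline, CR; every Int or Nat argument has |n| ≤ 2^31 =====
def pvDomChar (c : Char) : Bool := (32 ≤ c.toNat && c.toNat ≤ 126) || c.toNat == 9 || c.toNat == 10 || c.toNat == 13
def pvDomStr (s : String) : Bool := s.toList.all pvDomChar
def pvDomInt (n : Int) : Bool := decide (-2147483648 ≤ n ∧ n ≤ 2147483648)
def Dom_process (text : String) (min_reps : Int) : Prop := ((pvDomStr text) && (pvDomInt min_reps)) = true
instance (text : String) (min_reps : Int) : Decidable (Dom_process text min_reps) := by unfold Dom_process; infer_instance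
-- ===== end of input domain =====

-- B replaces A's run-emitting state machine by two staged passes: a backward pass
-- computing per-position run lengths, then a forward per-character filter; same value.

-- ===== PORT A =====
-- `current_symbol * current_count` (char repeated cnt times; cnt.toNat clamps like Python for cnt < 0)
def pvRepeat (d : Char) (cnt : Int) : String := String.ofList (List.replicate cnt.toNat d)

-- one loop iteration: state (filtered_string, current_symbol, current_count)
def pvStepA (min_reps : Int) (st : String × Option Char × Int) (symbol : Char) : String × Option Char × Int :=
  match st with
  | (f, cur, cnt) =>
    if cur == some symbol then (f, cur, cnt + 1)
    else
      (match cur with          -- `if current_symbol and current_count < min_reps`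
       | some d => if cnt < min_reps then f ++ pvRepeat d cnt else f
       | none => f,
       some symbol, 1)

-- the post-loop flush (same `if current_symbol and current_count < min_reps` test)
def pvFinish (min_reps : Int) (st : String × Option Char × Int) : String :=
  match st with
  | (f, cur, cnt) =>
    match cur with
    | some d => if cnt < min_reps then f ++ pvRepeat d cnt else f
    | none => f

def process (text : String) (min_reps : Int) : String :=
  pvFinish min_reps (text.toList.foldl (pvStepA min_reps) ("", none, 0))

-- ===== PORT B =====
-- Pass 1 of Source B (the backward index loop), as the obvious structural recursion:
-- pvTails l lists, for each position, the length of the equal-char run starting there.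
def pvTails : List Char → List Nat
  | [] => []
  | c :: cs =>
    let r := pvTails cs
    (match cs, r with
     | d :: _, t :: _ => if c == d then t + 1 else 1
     | _, _ => 1) :: r

-- Pass 2 of Source B: walk chars paired with their tail values, tracking the previous
-- char (`i == 0 or c != text[i-1]`) and `full`, keeping c iff full < min_reps.
def pvForward (m : Int) : Option Char → Nat → List (Char × Nat) → List Char
  | _, _, [] => []
  | prev, full, (c, t) :: rest =>
    let full' := if prev == some c then full else t
    (if (full' : Int) < m then [c] else []) ++ pvForward m (some c) full' rest

def process_alt (text : String) (min_reps : Int) : String :=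
  String.ofList (pvForward min_reps none 0 (text.toList.zip (pvTails text.toList)))

-- ===== PRECONDITION & SPEC =====
def Spec_process (text : String) (min_reps : Int) (out : String) : Prop := out = process_alt text min_reps
instance (text : String) (min_reps : Int) (out : String) : Decidable (Spec_process text min_reps out) := by unfold Spec_process; infer_instance

-- ===== CLAIM (what is proved, stated in full; the proofs are below) =====
def Claim_equal_process : Prop := ∀ (text : String) (min_reps : Int), Dom_process text min_reps → Spec_process text min_reps (process text min_reps)

-- ===== LEMMAS AND PROOFS =====

-- the canonical value both ports compute: runs of l, short runs expanded
def pvRuns : Char → Nat → List Char → List (Char × Nat)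
  | d, k, [] => [(d, k)]
  | d, k, c :: cs => if c == d then pvRuns d (k + 1) cs else (d, k) :: pvRuns c 1 cs

def pvGroupby : List Char → List (Char × Nat)
  | [] => []
  | c :: cs => pvRuns c 1 cs

def pvEmitL (m : Int) (gs : List (Char × Nat)) : List Char :=
  ((gs.filter (fun p => decide ((p.2 : Int) < m))).map (fun p => List.replicate p.2 p.1)).flatten

-- invariant of A's loop
lemma loopA_run (m : Int) (cs : List Char) : ∀ (f : String) (d : Char) (k : Nat),
    pvFinish m (cs.foldl (pvStepA m) (f, some d, (k : Int))) = f ++ String.ofList (pvEmitL m (pvRuns d k cs)) := by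
  induction cs with
  | nil =>
    intro f d k
    simp only [List.foldl, pvRuns, pvFinish, pvEmitL, List.filter]
    by_cases h : (k : Int) < m
    · simp [h, pvRepeat]
    · simp [h]
  | cons c cs ih =>
    intro f d k
    simp only [List.foldl, pvStepA, pvRuns]
    by_cases h : c = d
    · subst h
      rw [if_pos (by simp), if_pos (by simp)]
      rw [show ((k : Int) + 1) = ((k + 1 : Nat) : Int) by push_cast; ring, ih]
    · rw [if_neg (show ¬ ((some d == some c) = true) by simp [Ne.symm h]),
          if_neg (show ¬ ((c == d) = true) by simp [h])]
      by_cases hm : (k : Int) < m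
      · rw [if_pos hm, show (1:Int) = ((1:Nat):Int) from rfl, ih]
        simp [pvEmitL, hm, pvRepeat, ← String.ofList_append, String.append_assoc]
      · rw [if_neg hm, show (1:Int) = ((1:Nat):Int) from rfl, ih]
        simp [pvEmitL, hm]

lemma process_eq_emit (m : Int) (text : String) :
    process text m = String.ofList (pvEmitL m (pvGroupby text.toList)) := by
  unfold process
  cases htl : text.toList with
  | nil => simp [pvGroupby, pvFinish, pvEmitL]
  | cons c cs =>
    simp only [List.foldl, pvStepA, pvGroupby]
    rw [if_neg (by simp), show (1:Int) = ((1:Nat):Int) from rfl, loopA_run]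
    simp

-- ----- B side -----

def pvDesc : Nat → List Nat
  | 0 => []
  | n + 1 => (n + 1) :: pvDesc n

lemma pvDesc_length (k : Nat) : (pvDesc k).length = k := by
  induction k with
  | zero => rfl
  | succ n ih => simp [pvDesc, ih]

lemma pvTails_cons (e : Char) (us : List Char) :
    pvTails (e :: us) = (match us, pvTails us with
       | x :: _, t :: _ => if e == x then t + 1 else 1
       | _, _ => 1) :: pvTails us := rfl

lemma tails_run (d : Char) (cs : List Char) (hcs : cs.head? ≠ some d) :
    ∀ k, pvTails (List.replicate (k + 1) d ++ cs) = pvDesc (k + 1) ++ pvTails cs := by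
  intro k
  induction k with
  | zero =>
    cases cs with
    | nil => simp [pvTails, pvDesc]
    | cons e cs' =>
      have hed : ¬ (d == e) = true := by
        simp only [List.head?] at hcs; simp; intro h; exact absurd (by rw [h]) hcs
      simp [pvTails, pvDesc, hed]
  | succ n ih =>
    have : List.replicate (n + 2) d ++ cs = d :: (List.replicate (n + 1) d ++ cs) := by
      simp [List.replicate]
    rw [this]
    rw [show pvTails (d :: (List.replicate (n+1) d ++ cs)) =
        (match List.replicate (n+1) d ++ cs, pvTails (List.replicate (n+1) d ++ cs) with
         | e :: _, t :: _ => if d == e then t + 1 else 1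
         | _, _ => 1) :: pvTails (List.replicate (n+1) d ++ cs) from rfl, ih]
    simp [List.replicate, pvDesc]

-- within a run, `full` is unchanged and each char is kept iff full < m
lemma forward_same (m : Int) (d : Char) (rest : List (Char × Nat)) :
    ∀ (ts : List Nat) (f : Nat),
      pvForward m (some d) f ((List.replicate ts.length d).zip ts ++ rest) =
        (if (f : Int) < m then List.replicate ts.length d else []) ++ pvForward m (some d) f rest := by
  intro ts
  induction ts with
  | nil => intro f; simp
  | cons t ts ih =>
    intro f
    simp only [List.length_cons, List.replicate, List.zip_cons_cons, List.cons_append, pvForward]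
    rw [if_pos (show (some d == some d) = true by simp)]
    rw [ih f]
    by_cases h : (f : Int) < m <;> simp [h]

-- after a run boundary the tracked state (prev, full) is irrelevant
lemma forward_reset (m : Int) (d : Char) (f : Nat) (u : List Char) (hu : u.head? ≠ some d) :
    pvForward m (some d) f (u.zip (pvTails u)) = pvForward m none 0 (u.zip (pvTails u)) := by
  cases u with
  | nil => rfl
  | cons e us =>
    have hde : ¬ ((some d == some e) = true) := by
      simp only [List.head?] at hu; simp; intro h; exact absurd (by rw [h]) hu
    rw [pvTails_cons]
    simp only [List.zip_cons_cons, pvForward]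
    rw [if_neg hde, if_neg (show ¬ (((none : Option Char) == some e) = true) by simp)]

lemma forward_emit (m : Int) : ∀ (n : Nat) (l : List Char), l.length ≤ n →
    pvForward m none 0 (l.zip (pvTails l)) = pvEmitL m (pvGroupby l) := by
  intro n
  induction n with
  | zero =>
    intro l hl
    have : l = [] := List.eq_nil_of_length_eq_zero (Nat.le_zero.mp hl)
    subst this; rfl
  | succ n ih =>
    intro l hl
    cases hL : l with
    | nil => rfl
    | cons c rest =>
      subst hL
      set t := rest.takeWhile (fun x => x == c) with ht
      set u := rest.dropWhile (fun x => x == c) with hu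
      have hrest : rest = t ++ u := (List.takeWhile_append_dropWhile).symm
      have htrep : t = List.replicate t.length c := by
        apply List.eq_replicate_of_mem
        intro b hb
        have := List.mem_takeWhile_imp hb
        simpa using this
      have hhu : u.head? ≠ some c := by
        rw [hu]
        have hk := List.head?_dropWhile_not (fun x => x == c) rest
        intro h
        rw [h] at hk
        simp at hk

      have hlen : u.length ≤ n := by
        have h1 : u.length ≤ rest.length := List.length_dropWhile_le _ _
        have h2 : rest.length + 1 ≤ n + 1 := by simpa using hl
        omega
      have hdecomp : c :: rest = List.replicate (t.length + 1) c ++ u := by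
        rw [show List.replicate (t.length + 1) c = c :: List.replicate t.length c by simp [List.replicate]]
        simp [hrest, ← htrep]
      rw [hdecomp, tails_run c u hhu]
      have hzip : (List.replicate (t.length + 1) c ++ u).zip (pvDesc (t.length + 1) ++ pvTails u) =
          (List.replicate (t.length + 1) c).zip (pvDesc (t.length + 1)) ++ u.zip (pvTails u) := by
        apply List.zip_append
        simp [pvDesc_length]
      rw [hzip]
      rw [show pvDesc (t.length + 1) = (t.length + 1) :: pvDesc t.length from rfl,
          show List.replicate (t.length + 1) c = c :: List.replicate t.length c by simp [List.replicate],
          List.zip_cons_cons, List.cons_append]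
      rw [show pvForward m none 0 ((c, t.length + 1) :: ((List.replicate t.length c).zip (pvDesc t.length) ++ u.zip (pvTails u))) =
          (if ((t.length + 1 : Nat) : Int) < m then [c] else []) ++
            pvForward m (some c) (t.length + 1) ((List.replicate t.length c).zip (pvDesc t.length) ++ u.zip (pvTails u)) by
        simp [pvForward]]
      rw [show (List.replicate t.length c).zip (pvDesc t.length) =
          (List.replicate (pvDesc t.length).length c).zip (pvDesc t.length) by rw [pvDesc_length]]
      rw [forward_same, pvDesc_length, forward_reset m c _ u hhu, ih u hlen]
      simp only [List.cons_append]
      -- groupby side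
      have hgrp : pvGroupby (c :: (List.replicate t.length c ++ u)) = (c, t.length + 1) :: pvGroupby u := by
        have key : ∀ (k : Nat) (j : Nat), pvRuns c j (List.replicate k c ++ u) = (c, j + k) :: pvGroupby u := by
          intro k
          induction k with
          | zero =>
            intro j
            cases hcu : u with
            | nil => simp [pvRuns, pvGroupby]
            | cons e us =>
              have he : ¬ ((e == c) = true) := by
                intro h
                apply hhu
                rw [hcu]
                simp only [List.head?, Option.some.injEq]
                exact (beq_iff_eq.mp h)
              simp [pvRuns, pvGroupby, he]
          | succ k ihk =>
            intro j
            rw [show List.replicate (k+1) c ++ u = c :: (List.replicate k c ++ u) by simp [List.replicate]]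
            rw [show pvRuns c j (c :: (List.replicate k c ++ u)) = pvRuns c (j+1) (List.replicate k c ++ u) by simp [pvRuns]]
            rw [ihk]
            congr 2
            omega
        show pvRuns c 1 (List.replicate t.length c ++ u) = _
        rw [key]
        congr 2
        omega
      rw [hgrp]
      simp only [pvEmitL, List.filter]
      by_cases hm : ((t.length : Int) + 1 < m)
      · simp [hm, List.replicate_succ]
      · simp [hm]

-- ===== VERDICT (by name: the statement is the Claim_ definition above) =====
theorem process_spec : Claim_equal_process := by
  intro text m _
  unfold Spec_process process_alt
  rw [process_eq_emit, forward_emit m text.toList.length text.toList le_rfl]
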